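-- pv_equiv track=rewrite | github.com/sivaramanl/Data_Mining_Text_Mining | 01_CS583_Projects/01_MS_PS_Sequential_Pattern_Mining/Source_code/ms_ps.py | custominarray
-- ===== SOURCE A (Python) =====
-- def custominarray(x,y,index):
--     flag = False
--     prev_indx = -1
--     for item in y:
--         if item in x:
--             indx = x.index(item)
--             if indx<index and indx > prev_indx:
--                 prev_indx = indx
--                 flag = True
--             else:
--                 flag = False
--                 break
--         else:
--             flag = False
--             break
--     return flag
-- ===== SOURCE B (Python) =====
-- def custominarray(x, y, index):
--     if not y:
--         return False
--     idxs = []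
--     for item in y:
--         if item not in x:
--             return False
--         idxs.append(x.index(item))
--     return all(a < b for a, b in zip([-1] + idxs, idxs)) and idxs[-1] < index
-- ===== Notes on version B (the rewrite author's own statement) =====
-- stated objective: alternative
-- what changed: B separates the work into two passes: first it builds the full list of first-occurrence indices (returning False early only on a missing element), then it verifies strict monotonicity with a zip-based all() and compares only the last index against the bound, instead of A's single interleaved scan carrying prev_indx/flag state with break.
import Mathlib
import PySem

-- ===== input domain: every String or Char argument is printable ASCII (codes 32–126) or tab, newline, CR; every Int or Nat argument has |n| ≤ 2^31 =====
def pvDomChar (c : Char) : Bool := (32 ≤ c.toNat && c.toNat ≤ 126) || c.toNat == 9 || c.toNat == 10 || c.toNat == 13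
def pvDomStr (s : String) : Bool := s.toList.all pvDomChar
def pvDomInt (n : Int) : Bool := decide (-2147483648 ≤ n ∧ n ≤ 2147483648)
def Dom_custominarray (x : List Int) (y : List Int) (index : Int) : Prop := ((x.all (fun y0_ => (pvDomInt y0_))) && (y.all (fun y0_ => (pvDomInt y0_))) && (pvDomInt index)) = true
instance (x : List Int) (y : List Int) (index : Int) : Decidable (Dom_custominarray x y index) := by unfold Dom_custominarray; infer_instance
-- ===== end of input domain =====

-- B is an alternative two-pass decomposition (collect all first-occurrence indices, then
-- verify monotonicity and the bound separately); same cost, different structure.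

-- ===== PORT A =====
-- the for-loop of A: state is (prev_indx, flag), break = immediate return false
def customLoopA (x : List Int) (index : Int) : Int → Bool → List Int → Bool
  | _, flag, [] => flag
  | prev, _, item :: rest =>
      match PySem.List.index? x item with
      | some indx =>
          if ((indx : Int) < index && (indx : Int) > prev) then
            customLoopA x index (indx : Int) true rest
          else false
      | none => false

def custominarray (x : List Int) (y : List Int) (index : Int) : Bool :=
  customLoopA x index (-1) false y

-- ===== PORT B =====
-- first pass of B: the list of x.index(item) for item in y, none if some item is missing
def collectIdxs (x : List Int) : List Int → Option (List Int)
  | [] => some []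
  | item :: rest =>
      match PySem.List.index? x item with
      | some i => (collectIdxs x rest).map (fun l => (i : Int) :: l)
      | none => none

def custominarray_alt (x : List Int) (y : List Int) (index : Int) : Bool :=
  match y with
  | [] => false
  | _ :: _ =>
    match collectIdxs x y with
    | none => false
    | some idxs =>
        -- all(a < b for a, b in zip([-1] + idxs, idxs)) and idxs[-1] < index
        (((-1 :: idxs).zip idxs).all (fun p => p.1 < p.2)) &&
        ((PySem.List.pyGet? idxs (-1)).getD 0 < index)

-- ===== PRECONDITION & SPEC =====
def Spec_custominarray (x : List Int) (y : List Int) (index : Int) (out : Bool) : Prop := out = custominarray_alt x y index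
instance (x : List Int) (y : List Int) (index : Int) (out : Bool) : Decidable (Spec_custominarray x y index out) := by unfold Spec_custominarray; infer_instance

-- ===== CLAIM (what is proved, stated in full; the proofs are below) =====
def Claim_equal_custominarray : Prop := ∀ (x : List Int) (y : List Int) (index : Int), Dom_custominarray x y index → Spec_custominarray x y index (custominarray x y index)

-- ===== LEMMAS AND PROOFS =====

lemma collectIdxs_ne_nil (x : List Int) (y : List Int) (l : List Int)
    (hy : y ≠ []) (h : collectIdxs x y = some l) : l ≠ [] := by
  cases y with
  | nil => exact absurd rfl hy
  | cons a t =>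
    simp only [collectIdxs] at h
    cases hix : PySem.List.index? x a with
    | none => rw [hix] at h; exact absurd h (by simp)
    | some i =>
      rw [hix] at h
      simp only [Option.map_eq_some_iff] at h
      obtain ⟨l', -, rfl⟩ := h
      simp

-- a strictly increasing chain starting at i ends above i
lemma chain_last (i : Int) (l : List Int) (hl : l ≠ [])
    (h : ((i :: l).zip l).all (fun p => decide (p.1 < p.2)) = true) :
    i < l.getLast?.getD 0 := by
  induction l generalizing i with
  | nil => exact absurd rfl hl
  | cons j t ih =>
    rw [List.zip_cons_cons, List.all_cons, Bool.and_eq_true] at h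
    obtain ⟨h1, h2⟩ := h
    have hij : i < j := of_decide_eq_true h1
    cases t with
    | nil => simpa using hij
    | cons b t' =>
      have := ih (hl := by simp) (i := j) h2
      rw [List.getLast?_cons_cons] at *
      omega

lemma loopA_eq (x : List Int) (index : Int) :
    ∀ (y : List Int) (prev : Int) (flag : Bool), y ≠ [] →
      customLoopA x index prev flag y =
        match collectIdxs x y with
        | none => false
        | some idxs =>
            (((prev :: idxs).zip idxs).all (fun p => p.1 < p.2)) &&
            ((PySem.List.pyGet? idxs (-1)).getD 0 < index) := by
  intro y
  induction y with
  | nil => intro _ _ h; exact absurd rfl h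
  | cons item rest ih =>
    intro prev flag _
    simp only [customLoopA, collectIdxs]
    cases hix : PySem.List.index? x item with
    | none => rfl
    | some i =>
      dsimp only
      cases hrest : collectIdxs x rest with
      | none =>
        cases rest with
        | nil => simp [collectIdxs] at hrest
        | cons b t =>
          simp only [Option.map_none]
          split_ifs with hc
          · rw [ih (i : Int) true (by simp), hrest]
          · rfl
      | some l =>
        cases rest with
        | nil =>
          simp only [collectIdxs] at hrest
          cases hrest
          simp only [Option.map_some, List.zip_cons_cons, List.zip_nil_right,
            List.all_cons, List.all_nil, PySem.List.pyGet?_neg_one,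
            List.getLast?_singleton, Option.getD_some, Bool.and_true]
          by_cases h1 : (i : Int) < index <;> by_cases h2 : prev < (i : Int) <;>
            simp [h1, h2, customLoopA]
        | cons b t =>
          have hlne : l ≠ [] := collectIdxs_ne_nil x (b :: t) l (by simp) hrest
          simp only [Option.map_some]
          split_ifs with hc
          · rw [ih (i : Int) true (by simp), hrest]
            dsimp only
            rw [PySem.List.pyGet?_neg_one, PySem.List.pyGet?_neg_one]
            have hlast : ((i : Int) :: l).getLast? = l.getLast? := by
              cases l with
              | nil => exact absurd rfl hlne
              | cons c u => rw [List.getLast?_cons_cons]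
            rw [hlast]
            rw [List.zip_cons_cons, List.all_cons]
            rw [Bool.and_eq_true] at hc
            have h2 : prev < (i : Int) := by
              have := of_decide_eq_true hc.2; omega
            simp [h2]
          · -- the guard failed: i ≥ index or i ≤ prev; RHS must be false too
            rw [PySem.List.pyGet?_neg_one]
            have hlast : ((i : Int) :: l).getLast? = l.getLast? := by
              cases l with
              | nil => exact absurd rfl hlne
              | cons c u => rw [List.getLast?_cons_cons]
            rw [hlast, List.zip_cons_cons, List.all_cons]
            rw [Bool.and_eq_true] at hc
            by_cases h2 : prev < (i : Int)
            · -- then i ≥ index; if the chain holds, the last element is ≥ i ≥ index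
              have h1 : ¬ (i : Int) < index := fun h => hc ⟨by simpa using h, by simpa using h2⟩
              by_cases hch : ((((i : Int)) :: l).zip l).all (fun p => decide (p.1 < p.2)) = true
              · have := chain_last (i : Int) l hlne hch
                have hL : ¬ l.getLast?.getD 0 < index := by omega
                simp [h2, hch, hL]
              · simp [Bool.eq_false_iff.mpr hch]
            · simp [h2]

-- ===== VERDICT (by name: the statement is the Claim_ definition above) =====
theorem custominarray_spec : Claim_equal_custominarray := by
  intro x y index _
  unfold Spec_custominarray custominarray custominarray_alt
  cases y with
  | nil => rfl
  | cons a t =>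
    rw [loopA_eq x index (a :: t) (-1) false (by simp)]
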